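-- pv_equiv track=rewrite | github.com/ansatzX/llm_router | llm_router/server.py | has_incomplete_mcp_tags
-- ===== SOURCE A (Python) =====
-- def has_incomplete_mcp_tags(text: str) -> bool:
--     """Check if text contains incomplete MCP XML tags.
--
--     This indicates the model tried to call a tool but the format was incorrect.
--
--     Args:
--         text: Response text to check.
--
--     Returns:
--         True if incomplete MCP tags are found, False otherwise.
--     """
--     if not text:
--         return False
--
--     # MCP tag patterns (order matters - check most specific first)
--     mcp_patterns = [
--         "<use_mcp_tool>",
--         "</use_mcp_tool>",
--         "<server_name>",
--         "</server_name>",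
--         "<tool_name>",
--         "</tool_name>",
--         "<arguments>",
--         "</arguments>",
--     ]
--
--     return any(pattern in text for pattern in mcp_patterns)
-- ===== SOURCE B (Python) =====
-- def has_incomplete_mcp_tags(text: str) -> bool:
--     """Single left-to-right scan: only at a '<' do we test the eight tag
--     bodies as prefixes, instead of eight independent substring searches."""
--     bodies = ("use_mcp_tool>", "/use_mcp_tool>", "server_name>", "/server_name>",
--               "tool_name>", "/tool_name>", "arguments>", "/arguments>")
--     for i, ch in enumerate(text):
--         if ch == '<' and any(text.startswith(b, i + 1) for b in bodies):
--             return True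
--     return False
-- ===== Notes on version B (the rewrite author's own statement) =====
-- stated objective: alternative
-- what changed: Replaced eight independent 'pattern in text' substring scans by one left-to-right pass that, only at each '<', prefix-tests the eight tag bodies.
import Mathlib
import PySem

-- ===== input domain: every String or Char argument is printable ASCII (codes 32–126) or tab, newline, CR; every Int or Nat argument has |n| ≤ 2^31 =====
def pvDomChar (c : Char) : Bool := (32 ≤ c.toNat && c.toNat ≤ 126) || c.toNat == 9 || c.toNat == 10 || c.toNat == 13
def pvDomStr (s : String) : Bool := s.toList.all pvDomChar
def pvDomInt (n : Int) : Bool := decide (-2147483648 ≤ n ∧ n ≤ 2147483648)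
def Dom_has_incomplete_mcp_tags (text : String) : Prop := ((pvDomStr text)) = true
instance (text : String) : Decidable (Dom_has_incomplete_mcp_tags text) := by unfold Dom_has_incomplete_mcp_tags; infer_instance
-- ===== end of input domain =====

-- B replaces eight independent substring scans by a single pass that prefix-tests
-- the eight tag bodies only at each '<' (objective: alternative traversal).

-- ===== PORT A =====
def pvMcpPatterns : List String :=
  ["<use_mcp_tool>", "</use_mcp_tool>", "<server_name>", "</server_name>",
   "<tool_name>", "</tool_name>", "<arguments>", "</arguments>"]

def has_incomplete_mcp_tags (text : String) : Bool :=
  if text == "" then false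
  else pvMcpPatterns.any (fun p => PySem.Str.isIn p text)

-- ===== PORT B =====
def pvMcpBodies : List (List Char) :=
  ["use_mcp_tool>".toList, "/use_mcp_tool>".toList, "server_name>".toList,
   "/server_name>".toList, "tool_name>".toList, "/tool_name>".toList,
   "arguments>".toList, "/arguments>".toList]

-- the enumerate loop of Source B: walk the characters; at '<', test the bodies as prefixes
def pvMcpScan : List Char → Bool
  | [] => false
  | c :: rest =>
    (c == '<' && pvMcpBodies.any (fun b => PySem.Chars.startswith rest b)) || pvMcpScan rest

def has_incomplete_mcp_tags_alt (text : String) : Bool :=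
  pvMcpScan text.toList

-- ===== PRECONDITION & SPEC =====
def Spec_has_incomplete_mcp_tags (text : String) (out : Bool) : Prop := out = has_incomplete_mcp_tags_alt text
instance (text : String) (out : Bool) : Decidable (Spec_has_incomplete_mcp_tags text out) := by unfold Spec_has_incomplete_mcp_tags; infer_instance

-- ===== CLAIM (what is proved, stated in full; the proofs are below) =====
def Claim_equal_has_incomplete_mcp_tags : Prop := ∀ (text : String), Dom_has_incomplete_mcp_tags text → Spec_has_incomplete_mcp_tags text (has_incomplete_mcp_tags text)

-- ===== LEMMAS AND PROOFS =====

-- scan = true iff some tag '<'::b (b a body) is an infix of the character list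
theorem pvMcpScan_iff (l : List Char) :
    pvMcpScan l = true ↔ ∃ b ∈ pvMcpBodies, ('<' :: b) <:+: l := by
  induction l with
  | nil =>
    simp only [pvMcpScan, Bool.false_eq_true, false_iff]
    rintro ⟨b, _, hi⟩
    exact List.cons_ne_nil _ _ (List.eq_nil_of_infix_nil hi)
  | cons c rest ih =>
    simp only [pvMcpScan, Bool.or_eq_true, Bool.and_eq_true, List.any_eq_true, ih,
      beq_iff_eq, PySem.Chars.startswith_iff]
    constructor
    · rintro (⟨hc, b, hb, hp⟩ | ⟨b, hb, hi⟩)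
      · exact ⟨b, hb, (hc ▸ (List.cons_prefix_cons.mpr ⟨rfl, hp⟩) : ('<' :: b) <+: c :: rest).isInfix⟩
      · exact ⟨b, hb, List.infix_cons hi⟩
    · rintro ⟨b, hb, hi⟩
      rcases List.infix_cons_iff.mp hi with hpre | hinf
      · rcases List.cons_prefix_cons.mp hpre with ⟨hc, hp⟩
        exact Or.inl ⟨hc.symm, b, hb, hp⟩
      · exact Or.inr ⟨b, hb, hinf⟩

-- each A-side pattern is '<' followed by the corresponding B-side body
theorem pvMcpPatterns_toList :
    pvMcpPatterns.map String.toList = pvMcpBodies.map (fun b => '<' :: b) := by decide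

-- ===== VERDICT (by name: the statement is the Claim_ definition above) =====
theorem has_incomplete_mcp_tags_spec : Claim_equal_has_incomplete_mcp_tags := by
  intro text _
  unfold Spec_has_incomplete_mcp_tags has_incomplete_mcp_tags has_incomplete_mcp_tags_alt
  by_cases hnil : text == ""
  · rw [if_pos hnil]
    have h0 : text.toList = [] := by
      simpa using congrArg String.toList (beq_iff_eq.mp hnil)
    rw [h0]
    rfl
  · rw [if_neg hnil]
    rw [Bool.eq_iff_iff]
    simp only [pvMcpScan_iff, List.any_eq_true, PySem.Str.isIn_iff_infix]
    constructor
    · rintro ⟨p, hp, hi⟩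
      have hm : p.toList ∈ pvMcpPatterns.map String.toList := List.mem_map_of_mem hp
      rw [pvMcpPatterns_toList] at hm
      rcases List.mem_map.mp hm with ⟨b, hb, he⟩
      exact ⟨b, hb, he ▸ hi⟩
    · rintro ⟨b, hb, hi⟩
      have hm : '<' :: b ∈ pvMcpPatterns.map String.toList := by
        rw [pvMcpPatterns_toList]
        exact List.mem_map_of_mem hb
      rcases List.mem_map.mp hm with ⟨p, hp, he⟩
      exact ⟨p, hp, he ▸ hi⟩
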